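-- pv_equiv track=rewrite | github.com/sagieinav/obsidian-cs-knowledge-base | 20 Education/23 Semester 1/23.01 Computer Science Intro/3 Tasks/3.8 Lists.py | is_kaprekar2
-- ===== SOURCE A (Python) =====
-- def is_kaprekar2(num):
--     res_arr = []
--     if num <= 1:
--         return res_arr
--
--     squared = str(num ** 2)
--
--     for i in range(1, len(squared)):
--         resha = int(squared[0:i])
--         sepha = int(squared[i:len(squared)])
--
--         if resha + sepha == num and resha != 0 and sepha != 0:
--             res_arr = [resha, sepha]
--             return res_arr
--
--     return res_arr
-- ===== SOURCE B (Python) =====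
-- def is_kaprekar2(num):
--     if num <= 1:
--         return []
--     m = num * num
--     t = m - num
--     L = len(str(m))
--     for k in range(L - 1, 0, -1):
--         d = 10 ** k - 1
--         if t % d == 0:
--             resha = t // d
--             sepha = num - resha
--             if 1 <= sepha < 10 ** k:
--                 return [resha, sepha]
--     return []
-- ===== Notes on version B (the rewrite author's own statement) =====
-- stated objective: alternative
-- what changed: B never splits the square into digit parts: it uses the algebraic characterization that a split of the square's digits sums to num iff the square minus num is divisible by the repdigit-of-nines of the low part's width, so it tests one modulus per width and derives both parts by a single division, scanning widths in the order matching A's first hit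
import Mathlib
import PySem

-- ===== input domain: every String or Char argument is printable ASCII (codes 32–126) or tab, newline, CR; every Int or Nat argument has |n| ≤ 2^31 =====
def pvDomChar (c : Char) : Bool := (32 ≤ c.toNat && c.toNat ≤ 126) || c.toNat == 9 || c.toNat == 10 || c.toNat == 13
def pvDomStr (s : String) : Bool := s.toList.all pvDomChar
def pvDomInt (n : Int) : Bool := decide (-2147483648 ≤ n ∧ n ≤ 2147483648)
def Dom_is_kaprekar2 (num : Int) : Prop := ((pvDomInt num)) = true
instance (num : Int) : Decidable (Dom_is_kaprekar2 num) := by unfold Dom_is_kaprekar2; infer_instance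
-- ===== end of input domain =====

set_option maxHeartbeats 3000000


-- B never takes the square apart: a digit split of the square sums to num iff the square minus num is divisible by the all-nines number of the low part's width, so B tests one modulus per width (alternative algorithm).

-- ===== PORT A =====
-- literal port of A; int() on the slices cannot raise (nonempty decimal-digit slices), so .getD 0 is never the fallback
def is_kaprekar2 (num : Int) : List Int :=
  let res_arr : List Int := []
  if num ≤ 1 then res_arr
  else
    let squared := PySem.Int.toStr (num ^ 2)
    let r := (PySem.List.pyRange 1 (PySem.Str.len squared) 1).foldl
      (fun st i =>
        match st with
        | some out => some out
        | none =>
          let resha := (PySem.Int.ofStr? (PySem.Str.slice squared (some 0) (some i))).getD 0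
          let sepha := (PySem.Int.ofStr? (PySem.Str.slice squared (some i) (some (PySem.Str.len squared)))).getD 0
          if resha + sepha = num ∧ resha ≠ 0 ∧ sepha ≠ 0 then some [resha, sepha] else none)
      none
    match r with
    | some out => out
    | none => res_arr

-- ===== PORT B =====
-- for k in range(L-1, 0, -1): the body at k = k'+1, recursing to k'; returns [] when the range is exhausted
def kapLoop (num t : Int) : Nat → List Int
  | 0 => []
  | k + 1 =>
    let d := (10:Int) ^ (k + 1) - 1
    if PySem.Int.mod t d = 0 then
      let resha := PySem.Int.floordiv t d
      let sepha := num - resha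
      if 1 ≤ sepha ∧ sepha < (10:Int) ^ (k + 1) then [resha, sepha]
      else kapLoop num t k
    else kapLoop num t k

def is_kaprekar2_alt (num : Int) : List Int :=
  if num ≤ 1 then []
  else
    let m := num * num
    let t := m - num
    let L := (PySem.Str.len (PySem.Int.toStr m)).toNat
    kapLoop num t (L - 1)

-- ===== PRECONDITION & SPEC =====
def Spec_is_kaprekar2 (num : Int) (out : List Int) : Prop := out = is_kaprekar2_alt num
instance (num : Int) (out : List Int) : Decidable (Spec_is_kaprekar2 num out) := by unfold Spec_is_kaprekar2; infer_instance

-- ===== CLAIM (what is proved, stated in full; the proofs are below) =====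
def Claim_equal_is_kaprekar2 : Prop := ∀ (num : Int), Dom_is_kaprekar2 num → Spec_is_kaprekar2 num (is_kaprekar2 num)

-- ===== LEMMAS AND PROOFS =====

-- decimal value of a most-significant-first digit-character list (what int() computes on it)
def pvV (ds : List Char) : Nat := ds.foldl (fun a c => a * 10 + (c.toNat - '0'.toNat)) 0

theorem pvNotSpace (c : Char) (h : c.isDigit = true) : PySem.Int.isIntSpace c = false := by
  simp [PySem.Int.isIntSpace]
  simp [Char.isDigit] at h
  and_intros <;> (rintro rfl; revert h; decide)

theorem pvDropWhile_digits (ds : List Char) (h : ∀ c ∈ ds, c.isDigit = true) :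
    List.dropWhile PySem.Int.isIntSpace ds = ds := by
  cases ds with
  | nil => rfl
  | cons c t => simp [List.dropWhile, pvNotSpace c (h c (by simp))]

-- int() on a nonempty all-digit character list returns its decimal value
theorem pvOfChars_digits (ds : List Char) (hne : ds ≠ [])
    (h : ∀ c ∈ ds, c.isDigit = true) :
    PySem.Int.ofChars? ds = some ((pvV ds : Nat) : Int) := by
  have hrev : ∀ c ∈ ds.reverse, c.isDigit = true := by simpa using h
  unfold PySem.Int.ofChars?
  rw [pvDropWhile_digits ds h, pvDropWhile_digits ds.reverse hrev, List.reverse_reverse]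
  conv_lhs => whnf
  split
  · rename_i ds' heq
    exact absurd (h '-' (by simp)) (by decide)
  · rename_i ds' heq
    exact absurd (h '+' (by simp)) (by decide)
  · rename_i cs0 hn1 hn2
    refine Eq.trans (congrArg (fun o : Option Nat => Option.map (fun n : Int => n) (do let a <- o; pure ((a : Nat) : Int))) (?_ : _ = some (pvV ds))) (by simp)
    cases ds with
    | nil => exact absurd rfl hne
    | cons c t =>
      have hc : c.isDigit = true := h c (by simp)
      have ht : ∀ x ∈ t, x.isDigit = true := fun x hx => h x (by simp [hx])
      conv_lhs => whnf
      rw [hc]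
      conv_lhs => whnf
      simp only [pvV, List.foldl]
      clear hne hrev hn1 hn2 h hc
      generalize (0 * 10 + (c.toNat - '0'.toNat)) = a
      clear c
      revert ht
      induction t generalizing a with
      | nil => intro _; rfl
      | cons d t' ih =>
        intro ht
        have hd : d.isDigit = true := ht d (by simp)
        conv_lhs => whnf
        rw [hd]
        conv_lhs => whnf
        simp only [List.foldl]
        exact ih _ (fun x hx => ht x (by simp [hx]))

-- str(n) for n > 0 is the decimal digits, most significant first
theorem pvToDigitsCore (fuel : Nat) : ∀ (n : Nat) (acc : List Char), 0 < n → n < fuel →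
    Nat.toDigitsCore 10 fuel n acc = ((Nat.digits 10 n).map Nat.digitChar).reverse ++ acc := by
  induction fuel with
  | zero => intro n acc h1 h2; omega
  | succ f ih =>
    intro n acc h1 h2
    rw [Nat.toDigitsCore]
    by_cases hq : n / 10 = 0
    · have hn : n < 10 := by omega
      rw [if_pos hq, Nat.digits_def' (by norm_num : (1:Nat) < 10) h1]
      have : Nat.digits 10 (n / 10) = [] := by rw [hq]; simp
      rw [this]
      simp [Nat.mod_eq_of_lt hn]
    · rw [if_neg hq]
      rw [ih (n / 10) _ (by omega) (by omega)]
      rw [Nat.digits_def' (by norm_num : (1:Nat) < 10) h1]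
      simp

theorem pvToDigits (n : Nat) (h : 0 < n) :
    Nat.toDigits 10 n = ((Nat.digits 10 n).map Nat.digitChar).reverse := by
  rw [Nat.toDigits, pvToDigitsCore (n + 1) n [] h (by omega)]
  simp

theorem pvDigitChar_isDigit (d : Nat) (h : d < 10) : (Nat.digitChar d).isDigit = true := by
  interval_cases d <;> decide

theorem pvDigitChar_val (d : Nat) (h : d < 10) : (Nat.digitChar d).toNat - '0'.toNat = d := by
  interval_cases d <;> decide

theorem pvV_reverse_map (l : List Nat) (h : ∀ d ∈ l, d < 10) :
    pvV ((l.map Nat.digitChar).reverse) = Nat.ofDigits 10 l := by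
  induction l with
  | nil => simp [pvV, Nat.ofDigits]
  | cons d t ih =>
    have hd := h d (by simp)
    have ht := ih (fun x hx => h x (by simp [hx]))
    simp only [List.map_cons, List.reverse_cons, pvV, List.foldl_append, List.foldl]
    rw [pvDigitChar_val d hd]
    simp only [pvV] at ht
    rw [ht, Nat.ofDigits_cons]
    ring

theorem pvOfDigits_lt (l : List Nat) (h : ∀ d ∈ l, d < 10) :
    Nat.ofDigits 10 l < 10 ^ l.length := by
  induction l with
  | nil => simp [Nat.ofDigits]
  | cons d t ih =>
    have := h d (by simp)
    have ht := ih (fun x hx => h x (by simp [hx]))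
    simp only [Nat.ofDigits_cons, List.length_cons, pow_succ]
    nlinarith

-- div/mod of M by powers of ten via the digit expansion
theorem pvDigits_div_mod (M j : Nat) (hj : j ≤ (Nat.digits 10 M).length) :
    M / 10 ^ j = Nat.ofDigits 10 ((Nat.digits 10 M).drop j) ∧
      M % 10 ^ j = Nat.ofDigits 10 ((Nat.digits 10 M).take j) := by
  have hM := Nat.ofDigits_digits 10 M
  have hlen : ((Nat.digits 10 M).take j).length = j := by simp [hj]
  have hlt : Nat.ofDigits 10 ((Nat.digits 10 M).take j) < 10 ^ j := by
    have := pvOfDigits_lt ((Nat.digits 10 M).take j)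
      (fun d hd => Nat.digits_lt_base (by norm_num) (List.mem_of_mem_take hd))
    rwa [hlen] at this
  have heq : M = Nat.ofDigits 10 ((Nat.digits 10 M).take j) +
      10 ^ j * Nat.ofDigits 10 ((Nat.digits 10 M).drop j) := by
    conv_lhs => rw [← hM, ← List.take_append_drop j (Nat.digits 10 M)]
    rw [Nat.ofDigits_append, hlen]
  generalize hq : Nat.ofDigits 10 ((Nat.digits 10 M).drop j) = q at heq ⊢
  generalize hr : Nat.ofDigits 10 ((Nat.digits 10 M).take j) = r at heq hlt ⊢
  constructor
  · rw [heq, Nat.add_mul_div_left _ _ (pow_pos (by norm_num) j), Nat.div_eq_of_lt hlt, Nat.zero_add]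
  · rw [heq, Nat.add_mul_mod_self_left, Nat.mod_eq_of_lt hlt]

theorem pvCharsEq (n : Int) (hn : 0 < n) :
    (PySem.Int.toStr n).toList = ((Nat.digits 10 n.toNat).map Nat.digitChar).reverse := by
  rw [PySem.Int.toList_toStr, PySem.Int.toChars, if_neg (by omega)]
  exact pvToDigits n.toNat (by omega)

-- int() of the i-character prefix of str(M): the upper digits of M
theorem pvParse_take (M i : Nat) (h1 : 1 ≤ i) (h2 : i ≤ (Nat.digits 10 M).length) :
    PySem.Int.ofChars? ((((Nat.digits 10 M).map Nat.digitChar).reverse).take i) =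
      some ((M / 10 ^ ((Nat.digits 10 M).length - i) : Nat) : Int) := by
  have hd : ∀ d ∈ (Nat.digits 10 M).drop ((Nat.digits 10 M).length - i), d < 10 :=
    fun d hd => Nat.digits_lt_base (by norm_num) (List.mem_of_mem_drop hd)
  have hrw : (((Nat.digits 10 M).map Nat.digitChar).reverse).take i =
      (((Nat.digits 10 M).drop ((Nat.digits 10 M).length - i)).map Nat.digitChar).reverse := by
    rw [List.take_reverse, ← List.map_drop]
    simp
  rw [hrw, pvOfChars_digits _ (by
        have : ((((Nat.digits 10 M).drop ((Nat.digits 10 M).length - i)).map Nat.digitChar).reverse).length = i := by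
          simp; omega
        intro hnil; rw [hnil] at this; simp at this; omega)
      (fun c hc => by
        simp only [List.mem_reverse, List.mem_map] at hc
        obtain ⟨d, hdm, rfl⟩ := hc
        exact pvDigitChar_isDigit d (hd d hdm)),
    pvV_reverse_map _ hd, (pvDigits_div_mod M _ (by omega)).1]

-- int() of the suffix of str(M) from position i: the lower digits of M
theorem pvParse_drop (M i : Nat) (h2 : i < (Nat.digits 10 M).length) :
    PySem.Int.ofChars? ((((Nat.digits 10 M).map Nat.digitChar).reverse).drop i) =
      some ((M % 10 ^ ((Nat.digits 10 M).length - i) : Nat) : Int) := by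
  have hd : ∀ d ∈ (Nat.digits 10 M).take ((Nat.digits 10 M).length - i), d < 10 :=
    fun d hd => Nat.digits_lt_base (by norm_num) (List.mem_of_mem_take hd)
  have hrw : (((Nat.digits 10 M).map Nat.digitChar).reverse).drop i =
      (((Nat.digits 10 M).take ((Nat.digits 10 M).length - i)).map Nat.digitChar).reverse := by
    rw [List.drop_reverse, ← List.map_take]
    simp
  rw [hrw, pvOfChars_digits _ (by
        have : ((((Nat.digits 10 M).take ((Nat.digits 10 M).length - i)).map Nat.digitChar).reverse).length = (Nat.digits 10 M).length - i := by
          simp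
        intro hnil; rw [hnil] at this; simp at this; omega)
      (fun c hc => by
        simp only [List.mem_reverse, List.mem_map] at hc
        obtain ⟨d, hdm, rfl⟩ := hc
        exact pvDigitChar_isDigit d (hd d hdm)),
    pvV_reverse_map _ hd, (pvDigits_div_mod M _ (by omega)).2]

-- 10^(L-1) ≤ M < 10^L for L the number of decimal digits
theorem pvDigitBounds (M : Nat) (hM : 0 < M) :
    10 ^ ((Nat.digits 10 M).length - 1) ≤ M ∧ M < 10 ^ (Nat.digits 10 M).length := by
  constructor
  · have h := Nat.base_pow_length_digits_le' 8 M (by omega)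
    have hL : 0 < (Nat.digits 10 M).length :=
      List.length_pos_of_ne_nil (Nat.digits_ne_nil_iff_ne_zero.mpr (by omega : M ≠ 0))
    have : (10:Nat) ^ (Nat.digits 10 M).length = 10 * 10 ^ ((Nat.digits 10 M).length - 1) := by
      rw [← pow_succ']
      congr 1
      omega
    norm_num at h
    omega
  · have := @Nat.lt_base_pow_length_digits' 8 M
    norm_num at this
    exact this

-- The core equivalence: A's digit-split condition at split position of width j equals
-- B's algebraic condition "(num^2 - num) divisible by 10^j - 1 with quotient giving a part in [1, 10^j)",
-- and when they hold both produce the same pair.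
theorem pvCond (num : Int) (M : Nat) (j : Nat) (h2 : 2 ≤ num)
    (hM : (M : Int) = num * num) (hj : 10 ^ j ≤ M) (hj1 : 1 ≤ j) :
    ((((M / 10 ^ j : Nat) : Int) + ((M % 10 ^ j : Nat) : Int) = num ∧
        ((M / 10 ^ j : Nat) : Int) ≠ 0 ∧ ((M % 10 ^ j : Nat) : Int) ≠ 0) ↔
      (PySem.Int.mod (num * num - num) ((10:Int) ^ j - 1) = 0 ∧
        1 ≤ num - PySem.Int.floordiv (num * num - num) ((10:Int) ^ j - 1) ∧
        num - PySem.Int.floordiv (num * num - num) ((10:Int) ^ j - 1) < (10:Int) ^ j)) ∧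
    ((((M / 10 ^ j : Nat) : Int) + ((M % 10 ^ j : Nat) : Int) = num) →
      (((M / 10 ^ j : Nat) : Int) = PySem.Int.floordiv (num * num - num) ((10:Int) ^ j - 1) ∧
        ((M % 10 ^ j : Nat) : Int) = num - PySem.Int.floordiv (num * num - num) ((10:Int) ^ j - 1))) := by
  set r : Int := ((M / 10 ^ j : Nat) : Int) with hrdef
  set s : Int := ((M % 10 ^ j : Nat) : Int) with hsdef
  have hP10 : (10:Int) ^ 1 ≤ (10:Int) ^ j := pow_le_pow_right₀ (by norm_num) hj1
  have hPpos : (0:Int) < (10:Int) ^ j := by positivity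
  have hDpos : (0:Int) < (10:Int) ^ j - 1 := by norm_num at hP10; omega
  have hPcast : ((10 ^ j : Nat) : Int) = (10:Int) ^ j := by push_cast; ring
  have hrs : r * (10:Int) ^ j + s = num * num := by
    rw [hrdef, hsdef, ← hM]
    rw [← hPcast]
    push_cast
    exact_mod_cast congrArg (fun n : Nat => (n : Int)) (Nat.div_add_mod' M (10 ^ j))
  have hs0 : 0 ≤ s := Int.natCast_nonneg _
  have hsP : s < (10:Int) ^ j := by
    rw [hsdef, ← hPcast]
    exact_mod_cast Nat.mod_lt M (by positivity)
  have hr1 : 1 ≤ r := by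
    rw [hrdef]
    exact_mod_cast (Nat.one_le_div_iff (by positivity)).mpr hj
  have hfd : PySem.Int.floordiv (num * num - num) ((10:Int) ^ j - 1)
      = (num * num - num) / ((10:Int) ^ j - 1) :=
    PySem.Int.floordiv_eq_ediv_of_pos hDpos
  have hmd : PySem.Int.mod (num * num - num) ((10:Int) ^ j - 1)
      = (num * num - num) % ((10:Int) ^ j - 1) :=
    PySem.Int.mod_eq_emod_of_pos hDpos
  have htpos : (0:Int) < num * num - num := by nlinarith
  have forward : (r + s = num ∧ r ≠ 0 ∧ s ≠ 0) →
      (r = PySem.Int.floordiv (num * num - num) ((10:Int) ^ j - 1) ∧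
        s = num - PySem.Int.floordiv (num * num - num) ((10:Int) ^ j - 1) ∧
        PySem.Int.mod (num * num - num) ((10:Int) ^ j - 1) = 0) := by
    rintro ⟨h1, -, -⟩
    have htD : num * num - num = r * ((10:Int) ^ j - 1) := by
      rw [← hrs, ← h1]; ring
    have hq : PySem.Int.floordiv (num * num - num) ((10:Int) ^ j - 1) = r := by
      rw [hfd, htD, Int.mul_ediv_cancel _ (ne_of_gt hDpos)]
    refine ⟨hq.symm, by omega, ?_⟩
    rw [hmd, htD, Int.mul_emod_left]
  constructor
  constructor
  · rintro hC
    obtain ⟨hq, hsq, hm⟩ := forward hC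
    refine ⟨hm, ?_, ?_⟩
    · omega
    · omega
  · rintro ⟨hm, hb1, hb2⟩
    set q := PySem.Int.floordiv (num * num - num) ((10:Int) ^ j - 1) with hqdef
    have hdvd : ((10:Int) ^ j - 1) ∣ (num * num - num) := by
      rw [hmd] at hm
      exact Int.dvd_of_emod_eq_zero hm
    have hqmul : q * ((10:Int) ^ j - 1) = num * num - num := by
      rw [hfd]
      exact Int.ediv_mul_cancel hdvd
    have hq1 : 1 ≤ q := by nlinarith
    have e1 : q * (10:Int) ^ j + (num - q) = r * (10:Int) ^ j + s := by
      rw [hrs]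
      nlinarith [hqmul]
    have hqr : q = r := by
      have h1 : ((num - q) + q * (10:Int) ^ j) / (10:Int) ^ j = q := by
        rw [Int.add_mul_ediv_right _ _ (ne_of_gt hPpos),
          Int.ediv_eq_zero_of_lt (by omega) hb2, zero_add]
      have h2 : (s + r * (10:Int) ^ j) / (10:Int) ^ j = r := by
        rw [Int.add_mul_ediv_right _ _ (ne_of_gt hPpos),
          Int.ediv_eq_zero_of_lt hs0 hsP, zero_add]
      rw [← h1, ← h2]
      congr 1
      linarith [e1]
    have hse : s = num - q := by nlinarith [e1, hqr]
    refine ⟨by omega, by omega, by omega⟩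
  · intro h1
    have htD : num * num - num = r * ((10:Int) ^ j - 1) := by
      rw [← hrs, ← h1]; ring
    have hq : PySem.Int.floordiv (num * num - num) ((10:Int) ^ j - 1) = r := by
      rw [hfd, htD, Int.mul_ediv_cancel _ (ne_of_gt hDpos)]
    exact ⟨hq.symm, by omega⟩

theorem pvFoldSome (g : Int → Option (List Int)) (l : List Int) (out : List Int) :
    l.foldl (fun st i => match st with | some o => some o | none => g i) (some out) = some out := by
  induction l with
  | nil => rfl
  | cons x t ih => simpa [List.foldl] using ih

theorem pvPyRangeNil (a b : Int) (h : b ≤ a) : PySem.List.pyRange a b = [] := by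
  simp [PySem.List.pyRange, not_lt.mpr h]

-- A's remaining loop from split position L-k equals B's loop with k split widths left to try
theorem pvLoopEq (num : Int) (squared : String) (M L : Nat)
    (h2 : 2 ≤ num) (hM : (M : Int) = num * num) (hMlow : 10 ^ (L - 1) ≤ M)
    (hlen : PySem.Str.len squared = (L : Int))
    (htake : ∀ i : Nat, 1 ≤ i → i < L →
      PySem.Int.ofStr? (PySem.Str.slice squared (some (i : Int)) (some (PySem.Str.len squared))) =
        some ((M % 10 ^ (L - i) : Nat) : Int))
    (hdiv : ∀ i : Nat, 1 ≤ i → i < L →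
      PySem.Int.ofStr? (PySem.Str.slice squared (some 0) (some (i : Int))) =
        some ((M / 10 ^ (L - i) : Nat) : Int)) :
    ∀ k : Nat, k < L →
    (match (PySem.List.pyRange ((L - k : Nat) : Int) (PySem.Str.len squared)).foldl
      (fun st i =>
        match st with
        | some out => some out
        | none =>
          let resha := (PySem.Int.ofStr? (PySem.Str.slice squared (some 0) (some i))).getD 0
          let sepha := (PySem.Int.ofStr? (PySem.Str.slice squared (some i) (some (PySem.Str.len squared)))).getD 0
          if resha + sepha = num ∧ resha ≠ 0 ∧ sepha ≠ 0 then some [resha, sepha] else none)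
      none with
    | some out => out
    | none => []) = kapLoop num (num * num - num) k := by
  intro k
  induction k with
  | zero =>
    intro _
    rw [hlen, pvPyRangeNil _ _ (by omega)]
    rfl
  | succ k ih =>
    intro hk
    rw [hlen, PySem.List.pyRange_one_cons (by exact_mod_cast (by omega : (L - (k+1) : Nat) < L))]
    rw [show (((L - (k+1) : Nat) : Int) + 1) = ((L - k : Nat) : Int) by omega]
    rw [List.foldl_cons]
    have hi1 : 1 ≤ L - (k+1) := by omega
    have hi2 : L - (k+1) < L := by omega
    have hLi : L - (L - (k+1)) = k + 1 := by omega
    have hdv := hdiv (L - (k+1)) hi1 hi2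
    have htk := htake (L - (k+1)) hi1 hi2
    rw [hLi] at hdv htk
    rw [hlen] at htk
    simp only [hdv, htk, Option.getD_some]
    obtain ⟨hiff, hval⟩ := pvCond num M (k+1) h2 hM
      (le_trans (Nat.pow_le_pow_right (by norm_num) (by omega : k + 1 ≤ L - 1)) hMlow)
      (by omega)
    by_cases hC : ((M / 10 ^ (k+1) : Nat) : Int) + ((M % 10 ^ (k+1) : Nat) : Int) = num ∧
        ((M / 10 ^ (k+1) : Nat) : Int) ≠ 0 ∧ ((M % 10 ^ (k+1) : Nat) : Int) ≠ 0
    · rw [if_pos hC, pvFoldSome]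
      obtain ⟨hm, hb1, hb2⟩ := hiff.mp hC
      obtain ⟨er, es⟩ := hval hC.1
      simp only [kapLoop]
      rw [if_pos hm, if_pos ⟨hb1, hb2⟩, er, es]
    · rw [if_neg hC]
      have hrest := ih (by omega)
      rw [hlen] at hrest
      simp only [kapLoop]
      by_cases hm : PySem.Int.mod (num * num - num) ((10:Int) ^ (k+1) - 1) = 0
      · rw [if_pos hm]
        by_cases hb : 1 ≤ num - PySem.Int.floordiv (num * num - num) ((10:Int) ^ (k+1) - 1) ∧
            num - PySem.Int.floordiv (num * num - num) ((10:Int) ^ (k+1) - 1) < (10:Int) ^ (k+1)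
        · exact absurd (hiff.mpr ⟨hm, hb.1, hb.2⟩) hC
        · rw [if_neg hb]
          exact hrest
      · rw [if_neg hm]
        exact hrest

-- ===== VERDICT (by name: the statement is the Claim_ definition above) =====
theorem is_kaprekar2_spec : Claim_equal_is_kaprekar2 := by
  unfold Claim_equal_is_kaprekar2
  intro num _
  unfold Spec_is_kaprekar2 is_kaprekar2 is_kaprekar2_alt
  by_cases hle : num ≤ 1
  · simp only [if_pos hle]
  · simp only [if_neg hle]
    have h2 : (2:Int) ≤ num := by omega
    have hmpos : (0:Int) < num * num := by positivity
    have hMcast : (((num * num).toNat : Nat) : Int) = num * num := Int.toNat_of_nonneg (by positivity)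
    rw [show num ^ 2 = num * num from sq num, ← hMcast]
    generalize hMg : (num * num).toNat = M at hMcast
    have hMpos : 0 < M := by omega
    have hL1 : 1 ≤ (Nat.digits 10 M).length :=
      List.length_pos_of_ne_nil (Nat.digits_ne_nil_iff_ne_zero.mpr (by omega))
    generalize hLg : (Nat.digits 10 M).length = L at hL1
    have hchars : (PySem.Int.toStr ((M : Nat) : Int)).toList = ((Nat.digits 10 M).map Nat.digitChar).reverse := by
      have := pvCharsEq ((M : Nat) : Int) (by exact_mod_cast hMpos)
      simpa using this
    have hlen : PySem.Str.len (PySem.Int.toStr ((M : Nat) : Int)) = (L : Int) := by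
      rw [PySem.Str.len_eq, hchars]; simp [hLg]
    have htake : ∀ i : Nat, 1 ≤ i → i < L →
        PySem.Int.ofStr? (PySem.Str.slice (PySem.Int.toStr ((M : Nat) : Int)) (some (i : Int)) (some (PySem.Str.len (PySem.Int.toStr ((M : Nat) : Int))))) =
          some ((M % 10 ^ (L - i) : Nat) : Int) := by
      intro i hi1 hi2
      rw [hlen, PySem.Int.ofStr?.eq_1, PySem.Str.toList_slice, hchars]
      have hsl : PySem.Chars.slice (((Nat.digits 10 M).map Nat.digitChar).reverse) (some (i : Int)) (some (L : Int)) =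
          (((Nat.digits 10 M).map Nat.digitChar).reverse).drop i := by
        rw [show PySem.Chars.slice (((Nat.digits 10 M).map Nat.digitChar).reverse) (some (i : Int)) (some (L : Int)) =
            PySem.List.slice (((Nat.digits 10 M).map Nat.digitChar).reverse) (some (i : Int)) (some (L : Int)) from rfl,
          PySem.List.slice_natCast]
        apply List.take_of_length_le
        simp [hLg]
      rw [hsl, pvParse_drop M i (by omega), hLg]
    have hdiv : ∀ i : Nat, 1 ≤ i → i < L →
        PySem.Int.ofStr? (PySem.Str.slice (PySem.Int.toStr ((M : Nat) : Int)) (some 0) (some (i : Int))) =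
          some ((M / 10 ^ (L - i) : Nat) : Int) := by
      intro i hi1 hi2
      rw [PySem.Int.ofStr?.eq_1, PySem.Str.toList_slice, hchars]
      rw [show PySem.Chars.slice (((Nat.digits 10 M).map Nat.digitChar).reverse) (some 0) (some (i : Int)) =
          PySem.List.slice (((Nat.digits 10 M).map Nat.digitChar).reverse) (some 0) (some (i : Int)) from rfl,
        PySem.List.slice_zero_start, PySem.List.slice_to_natCast]
      rw [pvParse_take M i hi1 (by omega), hLg]
    have hMlow : 10 ^ (L - 1) ≤ M := by
      have := (pvDigitBounds M hMpos).1
      rwa [hLg] at this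
    have hmain := pvLoopEq num (PySem.Int.toStr ((M : Nat) : Int)) M L h2 hMcast hMlow hlen htake hdiv (L - 1) (by omega)
    rw [show ((L - (L - 1) : Nat) : Int) = 1 by omega] at hmain
    rw [← hMcast] at hmain
    rw [hlen] at hmain ⊢
    simp only [Int.toNat_natCast]
    exact hmain
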